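-- pv_equiv track=rewrite | github.com/keepitsimpledev/aoc2020 | day4/part1.py | parse_passport_entries
-- ===== SOURCE A (Python) =====
-- def parse_entry_line(line: str):
--     if line == '':
--         return None
--     else:
--         parts = line.split(' ')
--         labels = []
--         for part in parts:
--             labels = labels + [part.partition(':')[0]]
--         return labels
--
-- def parse_passport_entries(lines):
--     passports = []
--     passport_labels = []
--     for line in lines:
--         info = parse_entry_line(line)
--         if info is None:
--             passports = passports + [passport_labels.copy()]
--             passport_labels = []
--         else:
--             passport_labels = passport_labels + info
--     if passport_labels is not None:
--         passports = passports + [passport_labels.copy()]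
--     return passports
-- ===== SOURCE B (Python) =====
-- def parse_passport_entries(lines):
--     groups = [[]]
--     for line in reversed(lines):
--         if line == '':
--             groups = [[]] + groups
--         else:
--             groups = [[line] + groups[0]] + groups[1:]
--     return [[part.partition(':')[0] for line in g for part in line.split(' ')]
--             for g in groups]
-- ===== Notes on version B (the rewrite author's own statement) =====
-- stated objective: alternative
-- what changed: Replaces A's single forward accumulator loop (current-labels buffer flushed into passports on blank lines, with a token-folding helper) by a back-to-front fold over reversed(lines) that builds the group list directly, followed by one comprehension mapping each group to its labels.
import Mathlib
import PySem

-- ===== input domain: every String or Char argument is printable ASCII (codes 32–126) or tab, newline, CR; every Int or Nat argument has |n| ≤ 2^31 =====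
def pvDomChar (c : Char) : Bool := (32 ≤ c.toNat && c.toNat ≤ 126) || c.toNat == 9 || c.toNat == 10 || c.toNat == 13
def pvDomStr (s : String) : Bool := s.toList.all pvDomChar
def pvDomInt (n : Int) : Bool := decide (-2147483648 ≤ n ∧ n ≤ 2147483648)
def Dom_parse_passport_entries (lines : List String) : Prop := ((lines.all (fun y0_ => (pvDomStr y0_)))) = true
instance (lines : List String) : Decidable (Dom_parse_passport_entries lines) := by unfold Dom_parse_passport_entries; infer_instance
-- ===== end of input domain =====

-- B rebuilds the group list by structural recursion (back-to-front) and then maps each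
-- group to its labels with one comprehension; A threads a forward accumulator pair.

-- s.partition(':')[0]: exact for the single-character separator ':' — the prefix before the first ':'
def pvBeforeColon (s : String) : String := String.ofList (s.toList.takeWhile (fun c => c ≠ ':'))

-- ===== PORT A =====
-- parse_entry_line, token loop 'labels = labels + [part.partition(':')[0]]' kept as a foldl
def parse_entry_line (line : String) : Option (List String) :=
  if line = "" then none
  else some (((PySem.Str.split? line " ").getD []).foldl (fun labels part => labels ++ [pvBeforeColon part]) [])

-- A's for-loop over lines with state (passports, passport_labels)
def pvALoop : List (List String) × List String → List String → List (List String) × List String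
  | st, [] => st
  | (passports, passport_labels), line :: rest =>
      match parse_entry_line line with
      | none => pvALoop (passports ++ [passport_labels], []) rest
      | some info => pvALoop (passports, passport_labels ++ info) rest

def parse_passport_entries (lines : List String) : List (List String) :=
  let st := pvALoop ([], []) lines
  st.1 ++ [st.2]

-- ===== PORT B =====
-- Source B's reversed-iteration group builder, rendered as the structural foldr it is: built back-to-front
def pvGroups : List String → List (List String)
  | [] => [[]]
  | l :: ls =>
      let rest := pvGroups ls
      if l = "" then [] :: rest
      else (l :: rest.headD []) :: rest.tail

def parse_passport_entries_alt (lines : List String) : List (List String) :=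
  (pvGroups lines).map (fun g => g.flatMap (fun line => ((PySem.Str.split? line " ").getD []).map pvBeforeColon))

-- ===== PRECONDITION & SPEC =====
def Spec_parse_passport_entries (lines : List String) (out : List (List String)) : Prop := out = parse_passport_entries_alt lines
instance (lines : List String) (out : List (List String)) : Decidable (Spec_parse_passport_entries lines out) := by unfold Spec_parse_passport_entries; infer_instance

-- ===== CLAIM (what is proved, stated in full; the proofs are below) =====
def Claim_equal_parse_passport_entries : Prop := ∀ (lines : List String), Dom_parse_passport_entries lines → Spec_parse_passport_entries lines (parse_passport_entries lines)

-- ===== LEMMAS AND PROOFS =====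

theorem pvGroups_ne_nil (ls : List String) : pvGroups ls ≠ [] := by
  cases ls with
  | nil => simp [pvGroups]
  | cons l ls =>
      simp only [pvGroups]
      split <;> simp

-- labels of one group (B's inner comprehension)
def pvParseG (g : List String) : List String :=
  g.flatMap (fun line => ((PySem.Str.split? line " ").getD []).map pvBeforeColon)

theorem flatten_map_singleton {α β : Type} (f : α → β) (xs : List α) :
    (xs.map (fun x => [f x])).flatten = xs.map f := by
  induction xs with
  | nil => rfl
  | cons x xs ih => simp [ih]

theorem pvALoop_eq (ls : List String) :
    ∀ (ps : List (List String)) (cur : List String),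
      (pvALoop (ps, cur) ls).1 ++ [(pvALoop (ps, cur) ls).2]
        = ps ++ (cur ++ pvParseG ((pvGroups ls).headD [])) :: ((pvGroups ls).map pvParseG).tail := by
  induction ls with
  | nil => intro ps cur; simp [pvALoop, pvGroups, pvParseG]
  | cons l ls ih =>
      intro ps cur
      by_cases hl : l = ""
      · subst hl
        simp only [pvALoop, parse_entry_line, if_true]
        rw [ih]
        obtain ⟨h, t, hg⟩ : ∃ h t, pvGroups ls = h :: t := by
          cases hgr : pvGroups ls with
          | nil => exact absurd hgr (pvGroups_ne_nil ls)
          | cons h t => exact ⟨h, t, rfl⟩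
        simp [pvGroups, hg, pvParseG]
      · simp only [pvALoop, parse_entry_line, if_neg hl]
        rw [ih]
        obtain ⟨h, t, hg⟩ : ∃ h t, pvGroups ls = h :: t := by
          cases hgr : pvGroups ls with
          | nil => exact absurd hgr (pvGroups_ne_nil ls)
          | cons h t => exact ⟨h, t, rfl⟩
        simp [pvGroups, hg, if_neg hl, pvParseG, flatten_map_singleton]

-- ===== VERDICT (by name: the statement is the Claim_ definition above) =====
theorem parse_passport_entries_spec : Claim_equal_parse_passport_entries := by
  intro lines _
  unfold Spec_parse_passport_entries parse_passport_entries parse_passport_entries_alt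
  have h := pvALoop_eq lines [] []
  simp only [List.nil_append, List.nil_append] at h
  rw [h]
  obtain ⟨hd, tl, hg⟩ : ∃ h t, pvGroups lines = h :: t := by
    cases hgr : pvGroups lines with
    | nil => exact absurd hgr (pvGroups_ne_nil lines)
    | cons h t => exact ⟨h, t, rfl⟩
  simp [hg, pvParseG]
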